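-- pv_equiv track=rewrite | github.com/DannyMac180/chroma-sync | python/index_vault.py | replace_content_placeholders
-- ===== SOURCE A (Python) =====
-- def replace_content_placeholders(text: str) -> str:
--     """Replace any remaining content placeholders with appropriate messages."""
--     replacements = {
--         '[PDF_CONTENT_PLACEHOLDER]': '[PDF content extraction not configured]',
--         '[IMAGE_OCR_PLACEHOLDER]': '[Image OCR not configured]'
--     }
--
--     result = text
--     for placeholder, replacement in replacements.items():
--         result = result.replace(placeholder, replacement)
--
--     return result
-- ===== SOURCE B (Python) =====
-- import re
--
-- _REPLACEMENTS = {
--     '[PDF_CONTENT_PLACEHOLDER]': '[PDF content extraction not configured]',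
--     '[IMAGE_OCR_PLACEHOLDER]': '[Image OCR not configured]',
-- }
-- _PATTERN = re.compile('|'.join(re.escape(k) for k in _REPLACEMENTS))
--
--
-- def replace_content_placeholders(text: str) -> str:
--     """Replace any remaining content placeholders with appropriate messages."""
--     return _PATTERN.sub(lambda m: _REPLACEMENTS[m.group(0)], text)
-- ===== Notes on version B (the rewrite author's own statement) =====
-- stated objective: idiomatic
-- what changed: Instead of two sequential full-string str.replace passes (one per placeholder), B precompiles one alternation regex over the re.escape-d placeholder keys and does a single left-to-right re.sub pass substituting via a dict lookup.
import Mathlib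
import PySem

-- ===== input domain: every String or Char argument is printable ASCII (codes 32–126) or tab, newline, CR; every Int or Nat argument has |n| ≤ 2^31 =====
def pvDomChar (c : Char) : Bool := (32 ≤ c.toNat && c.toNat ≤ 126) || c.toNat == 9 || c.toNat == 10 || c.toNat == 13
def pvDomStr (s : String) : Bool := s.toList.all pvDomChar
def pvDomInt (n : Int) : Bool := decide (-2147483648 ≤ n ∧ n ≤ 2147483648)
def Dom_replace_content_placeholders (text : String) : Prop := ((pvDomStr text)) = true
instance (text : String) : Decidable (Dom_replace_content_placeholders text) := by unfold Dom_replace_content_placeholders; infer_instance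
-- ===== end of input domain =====

-- B replaces A's two sequential full-string str.replace passes with one left-to-right scan
-- (a precompiled alternation regex substituting via a dict lookup); same return value, one pass.

-- ===== PORT A =====
def replace_content_placeholders (text : String) : String :=
  let replacements : PySem.Dict String String :=
    ((PySem.Dict.empty).insert "[PDF_CONTENT_PLACEHOLDER]" "[PDF content extraction not configured]").insert
      "[IMAGE_OCR_PLACEHOLDER]" "[Image OCR not configured]"
  replacements.items.foldl (fun result pr => PySem.Str.replace result pr.1 pr.2) text

-- ===== PORT B =====
-- the two placeholder keys (in dict/alternation order) and their replacements
def pvP1 : List Char := "[PDF_CONTENT_PLACEHOLDER]".toList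
def pvR1 : List Char := "[PDF content extraction not configured]".toList
def pvP2 : List Char := "[IMAGE_OCR_PLACEHOLDER]".toList
def pvR2 : List Char := "[Image OCR not configured]".toList

-- pvScan is the exact semantics of Source B's single re.sub pass with the literal (re.escape-d)
-- alternation pattern: scan left to right; at each position try the alternatives in order;
-- on a match emit the mapped replacement and resume right after the match.
def pvScan : List Char → List Char
  | [] => []
  | c :: t =>
    if pvP1.isPrefixOf (c :: t) then pvR1 ++ pvScan (t.drop (pvP1.length - 1))
    else if pvP2.isPrefixOf (c :: t) then pvR2 ++ pvScan (t.drop (pvP2.length - 1))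
    else c :: pvScan t
termination_by s => s.length
decreasing_by
  all_goals simp

def replace_content_placeholders_alt (text : String) : String :=
  String.ofList (pvScan text.toList)

-- ===== PRECONDITION & SPEC =====
def Spec_replace_content_placeholders (text : String) (out : String) : Prop := out = replace_content_placeholders_alt text
instance (text : String) (out : String) : Decidable (Spec_replace_content_placeholders text out) := by unfold Spec_replace_content_placeholders; infer_instance

-- ===== CLAIM (what is proved, stated in full; the proofs are below) =====
def Claim_equal_replace_content_placeholders : Prop := ∀ (text : String), Dom_replace_content_placeholders text → Spec_replace_content_placeholders text (replace_content_placeholders text)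

-- ===== LEMMAS AND PROOFS =====

-- a fuel-free rendering of one full str.replace pass (CPython's non-overlapping left-to-right rule)
def pvRep (old new : List Char) : List Char → List Char
  | [] => []
  | c :: t =>
    if old.isPrefixOf (c :: t) then new ++ pvRep old new (t.drop (old.length - 1))
    else c :: pvRep old new t
termination_by s => s.length
decreasing_by
  all_goals simp

theorem pvGo_eq (old new : List Char) (hold : old ≠ []) :
    ∀ fuel l acc, l.length ≤ fuel →
      PySem.Chars.replace.go old new fuel l acc = acc.reverse ++ pvRep old new l := by
  intro fuel
  induction fuel with
  | zero =>
    intro l acc hl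
    have : l = [] := by cases l <;> simp_all
    subst this
    simp [PySem.Chars.replace.go, pvRep]
  | succ fuel ih =>
    intro l acc hl
    cases l with
    | nil => simp [PySem.Chars.replace.go, pvRep]
    | cons c t =>
      obtain ⟨o, os, rfl⟩ : ∃ o os, old = o :: os := by
        cases old with
        | nil => exact absurd rfl hold
        | cons o os => exact ⟨o, os, rfl⟩
      rw [PySem.Chars.replace.go]
      by_cases hpre : (o :: os).isPrefixOf (c :: t) = true
      · rw [if_pos hpre]
        have hdrop : List.drop (o :: os).length (c :: t) = t.drop os.length := by simp
        rw [hdrop, ih _ _ (by simp at hl ⊢; omega)]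
        rw [pvRep, if_pos hpre]
        simp
      · rw [if_neg hpre]
        rw [ih _ _ (by simp at hl ⊢; omega)]
        rw [pvRep, if_neg hpre]
        simp

theorem pvReplace_eq (s old new : List Char) (hold : old ≠ []) :
    PySem.Chars.replace s old new = pvRep old new s := by
  rw [PySem.Chars.replace, if_neg (by simp [hold]), pvGo_eq old new hold s.length s [] le_rfl]
  simp

-- a pass over pre ++ X leaves pre untouched when no match can start inside pre
theorem pvRep_append (old new : List Char) :
    ∀ (pre X : List Char),
      (∀ u ∈ pre.tails, u ≠ [] → ¬ old <+: u ∧ ¬ u <+: old) →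
      pvRep old new (pre ++ X) = pre ++ pvRep old new X := by
  intro pre
  induction pre with
  | nil => intro X _; simp
  | cons c p ih =>
    intro X h
    have hself := h (c :: p) (by simp [List.mem_tails]) (by simp)
    have hnp : old.isPrefixOf (c :: (p ++ X)) = false := by
      rw [Bool.eq_false_iff]
      intro hcontra
      have h1 : old <+: (c :: p) ++ X := by
        simpa [List.isPrefixOf_iff_prefix] using hcontra
      have h2 : (c :: p) <+: (c :: p) ++ X := List.prefix_append _ _
      rcases List.prefix_or_prefix_of_prefix h1 h2 with h3 | h3
      · exact hself.1 h3
      · exact hself.2 h3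
    rw [List.cons_append, pvRep, if_neg (by rw [hnp]; exact Bool.false_ne_true),
        ih X (fun u hu hne =>
          h u ((List.mem_tails _ _).mpr (((List.mem_tails _ _).mp hu).trans (List.suffix_cons _ _))) hne)]
    simp

-- decidable facts about the concrete placeholder/replacement strings
theorem pvFact1 : ∀ u ∈ pvR1.tails, u ≠ [] → ¬ pvP2 <+: u ∧ ¬ u <+: pvP2 := by decide
theorem pvFact2 : ∀ u ∈ pvP2.tails, u ≠ [] → ¬ pvP1 <+: u ∧ ¬ u <+: pvP1 := by decide
theorem pvFact3 : ∀ q ∈ pvP2.tails, q ≠ [] → ¬ q <+: pvR1 := by decide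
theorem pvLenP2R1 : pvP2.length < pvR1.length := by decide

-- the first pass cannot CREATE an occurrence of (a suffix of) the second placeholder
theorem pvNoNew' : ∀ (n : Nat) (s : List Char), s.length ≤ n →
    ∀ q, q ∈ pvP2.tails → ¬ q <+: s → ¬ q <+: pvRep pvP1 pvR1 s := by
  intro n
  induction n with
  | zero =>
    intro s hs q hq hns
    have : s = [] := by cases s <;> simp_all
    subst this
    rw [pvRep]
    intro hpre
    exact hns (by simpa using hpre)
  | succ n ih =>
    intro s hs q hq hns
    have hqne : q ≠ [] := fun h => hns (h ▸ List.nil_prefix)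
    cases s with
    | nil =>
      rw [pvRep]
      intro hpre
      exact hqne (List.prefix_nil.mp hpre)
    | cons c t =>
      by_cases h1 : pvP1.isPrefixOf (c :: t) = true
      · rw [pvRep, if_pos h1]
        intro hpre
        have hq' : q <:+ pvP2 := by simpa [List.mem_tails] using hq
        have hR1 : pvR1 <+: pvR1 ++ pvRep pvP1 pvR1 (t.drop (pvP1.length - 1)) :=
          List.prefix_append _ _
        rcases List.prefix_or_prefix_of_prefix hpre hR1 with h3 | h3
        · exact pvFact3 q hq hqne h3
        · have hl1 := h3.length_le
          have hl2 := hq'.length_le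
          have hl3 := pvLenP2R1
          omega
      · rw [pvRep, if_neg h1]
        intro hpre
        obtain ⟨q0, q', rfl⟩ : ∃ q0 q', q = q0 :: q' := by
          cases q with
          | nil => exact absurd rfl hqne
          | cons q0 q' => exact ⟨q0, q', rfl⟩
        rw [List.cons_prefix_cons] at hpre
        obtain ⟨rfl, hpre'⟩ := hpre
        have hq' : q' ∈ pvP2.tails := by
          simp [List.mem_tails] at hq ⊢
          exact (List.suffix_cons _ _).trans hq
        have hnt : ¬ q' <+: t := by
          intro hqt
          exact hns (List.cons_prefix_cons.mpr ⟨rfl, hqt⟩)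
        exact ih t (by simpa using Nat.lt_succ_iff.mp (Nat.lt_of_lt_of_le (by simp) hs)) q' hq' hnt hpre'

-- two sequential passes equal the single scan
theorem pvMain' : ∀ (n : Nat) (s : List Char), s.length ≤ n →
    pvRep pvP2 pvR2 (pvRep pvP1 pvR1 s) = pvScan s := by
  intro n
  induction n with
  | zero =>
    intro s hs
    have : s = [] := by cases s <;> simp_all
    subst this
    simp [pvRep, pvScan]
  | succ n ih =>
    intro s hs
    cases s with
    | nil => simp [pvRep, pvScan]
    | cons c t =>
      by_cases h1 : pvP1.isPrefixOf (c :: t) = true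
      · rw [pvRep, if_pos h1]
        rw [pvRep_append pvP2 pvR2 pvR1 _ pvFact1]
        rw [ih (t.drop (pvP1.length - 1)) (by simp at hs ⊢; omega)]
        rw [pvScan, if_pos h1]
      · by_cases h2 : pvP2.isPrefixOf (c :: t) = true
        · obtain ⟨r, hr⟩ : ∃ r, pvP2 ++ r = c :: t :=
            (List.isPrefixOf_iff_prefix.mp h2)
          rw [← hr]
          rw [pvRep_append pvP1 pvR1 pvP2 r pvFact2]
          have hP2 : ∃ p0 pt, pvP2 = p0 :: pt := ⟨'[', pvP2.tail, by decide⟩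
          obtain ⟨p0, pt, hp⟩ := hP2
          have hstep : ∀ Z : List Char, pvRep pvP2 pvR2 (pvP2 ++ Z) = pvR2 ++ pvRep pvP2 pvR2 Z := by
            intro Z
            conv_lhs => rw [hp, List.cons_append, pvRep]
            rw [if_pos (List.isPrefixOf_iff_prefix.mpr
                  (by rw [← List.cons_append]; exact List.prefix_append _ _))]
            have hdrop : (pt ++ Z).drop ((p0 :: pt).length - 1) = Z := by simp
            rw [hdrop, ← hp]
          rw [hstep]
          have hrlen : r.length ≤ n := by
            have := congrArg List.length hr
            simp [hp] at this hs
            omega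
          rw [ih r hrlen]
          have hrt : r = t.drop (pvP2.length - 1) := by
            have := congrArg (List.drop pvP2.length) hr
            simpa [hp] using this
          rw [hr, pvScan, if_neg h1, if_pos h2, ← hrt]
        · rw [pvRep, if_neg h1]
          have hnoc : ¬ pvP2 <+: (c :: pvRep pvP1 pvR1 t) := by
            have := pvNoNew' (c :: t).length (c :: t) le_rfl pvP2
              (by simp [List.mem_tails]) (fun h => h2 (List.isPrefixOf_iff_prefix.mpr h))
            rw [pvRep, if_neg h1] at this
            exact this
          rw [pvRep, if_neg (by simp [List.isPrefixOf_iff_prefix]; exact fun h => absurd h hnoc)]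
          rw [ih t (by simp at hs; omega)]
          rw [pvScan, if_neg h1, if_neg h2]

theorem pvA_eq (text : String) :
    replace_content_placeholders text =
      String.ofList (pvRep pvP2 pvR2 (pvRep pvP1 pvR1 text.toList)) := by
  show (PySem.Str.replace (PySem.Str.replace text "[PDF_CONTENT_PLACEHOLDER]" "[PDF content extraction not configured]")
        "[IMAGE_OCR_PLACEHOLDER]" "[Image OCR not configured]") = _
  simp only [PySem.Str.replace]
  rw [pvReplace_eq _ _ _ (by decide), pvReplace_eq _ _ _ (by decide)]
  congr 1
  simp [pvP1, pvR1, pvP2, pvR2]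

-- ===== VERDICT (by name: the statement is the Claim_ definition above) =====
theorem replace_content_placeholders_spec : Claim_equal_replace_content_placeholders := by
  intro text _
  show _ = replace_content_placeholders_alt text
  rw [pvA_eq, replace_content_placeholders_alt, pvMain' text.toList.length text.toList le_rfl]
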